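-- pv_equiv track=rewrite | github.com/PeterBohai/tower-of-rak | src/map.py | tiles_in_radius
-- ===== SOURCE A (Python) =====
-- def tiles_in_radius(center_coords, radius):
--     """Generates a list of map-grid coordinates of tiles in a `radius` around the center `coords`
--
--     Parameters
--     ----------
--     center_coords :tuple
--         The center map-grid coordinates of this area of tiles.
--     radius : int
--         The radius of the circle area.
--
--     Returns
--     -------
--     list
--         A list of map-grid coordinates in the area.
--
--     """
--     center_x, center_y = center_coords
--
--     coords_list = []
--     start_x = center_x - radius
--     end_x = center_x + radius
--
--     start_y = center_y - radius
--     end_y = center_y + radius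
--
--     for tile_in_radius_x in range(start_x, end_x + 1):
--         for tile_in_radius_y in range(start_y, end_y + 1):
--             coords_list.append((tile_in_radius_x, tile_in_radius_y))
--
--     if radius >= 2:
--         coords_remove = ((start_x, start_y), (end_x, end_y), (start_x, end_y), (end_x, start_y))
--         coords_list = [coord for coord in coords_list if coord not in coords_remove]
--
--     return coords_list
-- ===== SOURCE B (Python) =====
-- def tiles_in_radius(center_coords, radius):
--     """Row-structured construction: corners are removed structurally by slicing the
--     first and last rows, not by testing any point; middle rows are emitted whole."""
--     center_x, center_y = center_coords
--     ys = list(range(center_y - radius, center_y + radius + 1))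
--     if radius < 2:
--         return [(x, y) for x in range(center_x - radius, center_x + radius + 1) for y in ys]
--     trimmed = ys[1:-1]
--     result = [(center_x - radius, y) for y in trimmed]
--     for x in range(center_x - radius + 1, center_x + radius):
--         result.extend((x, y) for y in ys)
--     result += [(center_x + radius, y) for y in trimmed]
--     return result
-- ===== Notes on version B (the rewrite author's own statement) =====
-- stated objective: faster
-- what changed: Replaces A's generate-the-whole-square-then-filter-against-a-corner-tuple approach with a row-structured construction: the first and last rows are emitted from the y-range sliced as ys[1:-1] and the middle rows are emitted whole, so no point is ever tested against the corners.
import Mathlib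
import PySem

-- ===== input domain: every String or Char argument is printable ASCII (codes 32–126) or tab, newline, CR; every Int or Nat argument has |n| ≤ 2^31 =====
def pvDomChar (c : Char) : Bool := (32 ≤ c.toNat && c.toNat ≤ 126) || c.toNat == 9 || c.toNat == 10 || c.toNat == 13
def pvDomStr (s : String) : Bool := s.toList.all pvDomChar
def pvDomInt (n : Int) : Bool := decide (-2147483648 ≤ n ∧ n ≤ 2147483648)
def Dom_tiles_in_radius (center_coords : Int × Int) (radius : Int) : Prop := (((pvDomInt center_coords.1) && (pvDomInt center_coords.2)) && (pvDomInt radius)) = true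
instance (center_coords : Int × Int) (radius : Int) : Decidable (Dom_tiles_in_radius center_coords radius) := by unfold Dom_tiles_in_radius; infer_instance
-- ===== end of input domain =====

-- B builds the result row-structured (trimmed first row, full middle rows, trimmed last row),
-- removing corners by slicing so no per-point corner test runs (timing run measured B faster).

-- ===== PORT A =====
-- two passes: build the full square, then (radius >= 2) filter out the 4-tuple of corners
def tiles_in_radius (center_coords : Int × Int) (radius : Int) : List (Int × Int) :=
  let center_x := center_coords.1
  let center_y := center_coords.2
  let start_x := center_x - radius
  let end_x := center_x + radius
  let start_y := center_y - radius
  let end_y := center_y + radius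
  let coords_list : List (Int × Int) :=
    (PySem.List.pyRange start_x (end_x + 1) 1).foldl (fun acc x =>
      (PySem.List.pyRange start_y (end_y + 1) 1).foldl (fun acc2 y => acc2 ++ [(x, y)]) acc) []
  if radius ≥ 2 then
    let coords_remove : List (Int × Int) := [(start_x, start_y), (end_x, end_y), (start_x, end_y), (end_x, start_y)]
    coords_list.filter (fun coord => !(coords_remove.contains coord))
  else
    coords_list

-- ===== PORT B =====
-- row-structured: trimmed first row ++ full middle rows ++ trimmed last row (no per-point test)
def tiles_in_radius_alt (center_coords : Int × Int) (radius : Int) : List (Int × Int) :=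
  let center_x := center_coords.1
  let center_y := center_coords.2
  let ys := PySem.List.pyRange (center_y - radius) (center_y + radius + 1) 1
  if radius < 2 then
    (PySem.List.pyRange (center_x - radius) (center_x + radius + 1) 1).flatMap
      (fun x => ys.map (fun y => (x, y)))
  else
    let trimmed := PySem.List.slice ys (some 1) (some (-1))   -- ys[1:-1]
    let first := trimmed.map (fun y => (center_x - radius, y))
    let middle := (PySem.List.pyRange (center_x - radius + 1) (center_x + radius) 1).foldl
      (fun acc x => acc ++ ys.map (fun y => (x, y))) first
    middle ++ trimmed.map (fun y => (center_x + radius, y))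

-- ===== PRECONDITION & SPEC =====
def Spec_tiles_in_radius (center_coords : Int × Int) (radius : Int) (out : List (Int × Int)) : Prop := out = tiles_in_radius_alt center_coords radius
instance (center_coords : Int × Int) (radius : Int) (out : List (Int × Int)) : Decidable (Spec_tiles_in_radius center_coords radius out) := by unfold Spec_tiles_in_radius; infer_instance

-- ===== CLAIM (what is proved, stated in full; the proofs are below) =====
def Claim_equal_tiles_in_radius : Prop := ∀ (center_coords : Int × Int) (radius : Int), Dom_tiles_in_radius center_coords radius → Spec_tiles_in_radius center_coords radius (tiles_in_radius center_coords radius)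

-- ===== LEMMAS AND PROOFS =====

-- A's inner loop appends the full map over the y-range.
theorem a_inner (x : Int) (ys : List Int) (acc : List (Int × Int)) :
    ys.foldl (fun acc2 y => acc2 ++ [(x, y)]) acc = acc ++ ys.map (fun y => (x, y)) := by
  induction ys generalizing acc with
  | nil => simp
  | cons y ys ih => simp [List.foldl_cons, ih]

-- an outer loop that appends f x each step is acc ++ flatMap f
theorem fold_flatMap {α : Type} (xs : List Int) (f : Int → List α) (acc : List α)
    (g : List α → Int → List α) (hg : ∀ a x, g a x = a ++ f x) :
    xs.foldl g acc = acc ++ xs.flatMap f := by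
  induction xs generalizing acc with
  | nil => simp
  | cons x xs ih => simp [List.foldl_cons, hg, ih, List.flatMap_cons]

-- xs[1:-1] is tail-then-dropLast (for any list)
theorem slice_one_neg_one {α : Type} (xs : List α) :
    PySem.List.slice xs (some 1) (some (-1)) = xs.tail.dropLast := by
  simp [PySem.List.slice]
  cases xs with
  | nil => simp
  | cons a t => simp [List.dropLast_eq_take]

-- ys[1:-1] of the y-range is the inner y-range (when sy ≤ ey)
theorem trimmed_range (sy ey : Int) (h : sy + 1 ≤ ey) :
    PySem.List.slice (PySem.List.pyRange sy (ey + 1) 1) (some 1) (some (-1))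
      = PySem.List.pyRange (sy + 1) ey 1 := by
  rw [slice_one_neg_one, PySem.List.pyRange_one_cons (a := sy) (b := ey + 1) (by omega),
      List.tail_cons, PySem.List.pyRange_one_succ_right (a := sy + 1) (b := ey) (by omega),
      List.dropLast_concat]

-- filtering the end rows drops exactly the two ends of the y-range
theorem filter_edge_row (sy ey : Int) (h : sy + 1 ≤ ey) (p : Int → Bool)
    (hends : p sy = false ∧ p ey = false) (hmid : ∀ y, sy < y → y < ey → p y = true) :
    (PySem.List.pyRange sy (ey + 1) 1).filter p = PySem.List.pyRange (sy + 1) ey 1 := by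
  rw [PySem.List.pyRange_one_cons (a := sy) (b := ey + 1) (by omega),
      PySem.List.pyRange_one_succ_right (a := sy + 1) (b := ey) (by omega)]
  simp [List.filter_append, hends.1, hends.2, List.filter_eq_self,
        PySem.List.mem_pyRange_one]
  intro y h1 h2
  exact hmid y (by omega) (by omega)

-- ===== VERDICT (by name: the statement is the Claim_ definition above) =====
theorem tiles_in_radius_spec : Claim_equal_tiles_in_radius := by
  intro c r _
  show tiles_in_radius c r = tiles_in_radius_alt c r
  unfold tiles_in_radius tiles_in_radius_alt
  dsimp only
  rw [fold_flatMap (PySem.List.pyRange (c.1 - r) (c.1 + r + 1) 1)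
      (fun x => (PySem.List.pyRange (c.2 - r) (c.2 + r + 1) 1).map (fun y => (x, y))) []
      _ (fun a x => a_inner x _ a), List.nil_append]
  by_cases h2 : r ≥ 2
  · rw [if_pos h2, if_neg (by omega)]
    rw [fold_flatMap (PySem.List.pyRange (c.1 - r + 1) (c.1 + r) 1)
        (fun x => (PySem.List.pyRange (c.2 - r) (c.2 + r + 1) 1).map (fun y => (x, y)))
        _ _ (fun a x => rfl)]
    rw [trimmed_range (c.2 - r) (c.2 + r) (by omega)]
    -- split the x-range: sx :: middle ++ [ex]
    rw [show c.1 + r + 1 = (c.1 + r) + 1 by ring,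
        PySem.List.pyRange_one_cons (show c.1 - r < c.1 + r + 1 by omega),
        PySem.List.pyRange_one_succ_right (show c.1 - r + 1 ≤ c.1 + r by omega),
        List.flatMap_cons, List.flatMap_append, List.flatMap_singleton,
        List.filter_append, List.filter_append, List.filter_map, List.filter_map,
        List.filter_flatMap]
    -- the filter keeps exactly the inner y-range on the two edge rows
    have hedge : ∀ x : Int, (x = c.1 - r ∨ x = c.1 + r) →
        (PySem.List.pyRange (c.2 - r) (c.2 + r + 1) 1).filter
          ((fun coord => !([(c.1 - r, c.2 - r), (c.1 + r, c.2 + r), (c.1 - r, c.2 + r), (c.1 + r, c.2 - r)].contains coord)) ∘ (fun y => (x, y)))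
          = PySem.List.pyRange (c.2 - r + 1) (c.2 + r) 1 := by
      intro x hx
      apply filter_edge_row (c.2 - r) (c.2 + r) (by omega)
      · constructor <;> (simp [Function.comp]; tauto)
      · intro y hy1 hy2
        simp [Function.comp]
        omega
    -- the filter is the identity on every middle row
    have hmid : ∀ x ∈ PySem.List.pyRange (c.1 - r + 1) (c.1 + r) 1,
        ((PySem.List.pyRange (c.2 - r) (c.2 + r + 1) 1).map (fun y => (x, y))).filter
          (fun coord => !([(c.1 - r, c.2 - r), (c.1 + r, c.2 + r), (c.1 - r, c.2 + r), (c.1 + r, c.2 - r)].contains coord))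
          = (PySem.List.pyRange (c.2 - r) (c.2 + r + 1) 1).map (fun y => (x, y)) := by
      intro x hx
      rcases (PySem.List.mem_pyRange_one).1 hx with ⟨hx1, hx2⟩
      rw [List.filter_map]
      rw [List.filter_eq_self.mpr]
      intro y _
      simp [Function.comp]
      omega
    rw [hedge (c.1 - r) (Or.inl rfl), hedge (c.1 + r) (Or.inr rfl),
        List.flatMap_congr hmid, List.append_assoc]
  · rw [if_neg h2, if_pos (by omega)]
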